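-- pv_equiv track=rewrite | github.com/c0deaddict/led-table | server/server/leds/spiral.py | calc_spiral_coords
-- ===== SOURCE A (Python) =====
-- def calc_spiral_coords(size):
--     result = dict()
--
--     def emit(i, x, y):
--         result[(x + size, y + size)] = i
--
--     def enum_spiral(offset, n):
--         if n == 0:
--             emit(offset, 0, 0)
--             enum_spiral(offset + 1, n + 1)
--         elif n <= size:
--             x = n
--             y = n - 1
--             i = offset
--             emit(i, x, y)
--             for j in range(0, 2 * n - 1):
--                 y = y - 1
--                 i = i + 1
--                 emit(i, x, y)
--             for j in range(0, 2 * n):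
--                 x = x - 1
--                 i = i + 1
--                 emit(i, x, y)
--             for j in range(0, 2 * n):
--                 y = y + 1
--                 i = i + 1
--                 emit(i, x, y)
--             for j in range(0, 2 * n):
--                 x = x + 1
--                 i = i + 1
--                 emit(i, x, y)
--
--             enum_spiral(i + 1, n + 1)
--
--     enum_spiral(0, 0)
--     return result
-- ===== SOURCE B (Python) =====
-- def calc_spiral_coords(size):
--     n = max(size, 0)
--     total = (2 * n + 1) ** 2
--     dirs = ((1, 0), (0, -1), (-1, 0), (0, 1))
--     result = {(size, size): 0}
--     x = y = i = j = 0
--     while i < total - 1: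
--         dx, dy = dirs[j % 4]
--         for _ in range(min(j // 2 + 1, total - 1 - i)):
--             x += dx
--             y += dy
--             i += 1
--             result[(x + size, y + size)] = i
--         j += 1
--     return result
-- ===== Notes on version B (the rewrite author's own statement) =====
-- stated objective: simpler
-- what changed: Replaces the recursive per-ring enumeration (four hand-written edge loops per ring, offset threaded through recursive calls) with a single iterative spiral walk that cycles through the four unit directions, with leg lengths growing every second leg and capped by the number of remaining cells.
import Mathlib
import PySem

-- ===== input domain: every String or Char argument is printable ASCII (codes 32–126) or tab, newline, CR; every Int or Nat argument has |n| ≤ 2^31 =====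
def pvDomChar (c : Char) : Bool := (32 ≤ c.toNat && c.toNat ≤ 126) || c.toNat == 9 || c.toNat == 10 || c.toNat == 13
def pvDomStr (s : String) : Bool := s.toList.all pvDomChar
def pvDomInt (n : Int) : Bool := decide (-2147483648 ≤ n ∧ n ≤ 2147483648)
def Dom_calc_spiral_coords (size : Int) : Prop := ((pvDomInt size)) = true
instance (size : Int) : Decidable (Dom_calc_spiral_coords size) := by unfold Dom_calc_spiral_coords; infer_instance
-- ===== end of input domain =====

-- B replaces A's recursive per-ring enumeration by one iterative direction-vector
-- spiral walk (leg lengths grow every second leg, capped by the remaining cell count).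
-- The Python dict {(x+size, y+size): i} is represented as a List (Int × Int × Int)
-- of (key1, key2, value) triples in insertion order.

-- small hand-written termination lemmas for the two ports (cited by name from
-- 'decreasing_by'; kept tiny so the ports' proof terms stay small)
theorem enumSpiral_dec0 (size n : Int) (h : n = 0) :
    (size + 1 - (n + 1)).toNat + (1 - (n + 1)).toNat
      < (size + 1 - n).toNat + (1 - n).toNat := by
  subst h
  rw [show size + 1 - (0 + 1) = size by ring, show (1 : Int) - (0 + 1) = 0 by ring,
      show size + 1 - 0 = size + 1 by ring, show (1 : Int) - 0 = 1 by ring,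
      Int.toNat_zero, Int.toNat_one, Nat.add_zero]
  exact Nat.lt_succ_of_le (Int.toNat_le_toNat (by linarith))

theorem enumSpiral_dec1 (size n : Int) (h1 : ¬ n = 0) (h2 : n ≤ size) :
    (size + 1 - (n + 1)).toNat + (1 - (n + 1)).toNat
      < (size + 1 - n).toNat + (1 - n).toNat := by
  rcases lt_or_gt_of_ne h1 with hneg | hpos
  · exact Nat.add_lt_add_of_le_of_lt (Int.toNat_le_toNat (by linarith))
      ((Int.toNat_lt_toNat (by linarith)).mpr (by linarith))
  · rw [Int.toNat_of_nonpos (by linarith : (1 : Int) - (n + 1) ≤ 0),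
        Int.toNat_of_nonpos (by linarith : (1 : Int) - n ≤ 0), Nat.add_zero, Nat.add_zero]
    exact (Int.toNat_lt_toNat (by linarith)).mpr (by linarith)

theorem bLoop_dec (total i : Int) (j : Nat) (h : i < total - 1) :
    (total - 1 - (i + ((min (j / 2 + 1) ((total - 1 - i).toNat) : Nat) : Int))).toNat
      < (total - 1 - i).toNat := by
  have h0 : (0 : Int) < total - 1 - i := by linarith
  have hR : 0 < (total - 1 - i).toNat := by
    rw [← Int.toNat_zero]; exact (Int.toNat_lt_toNat h0).mpr h0
  have hm1 : 1 ≤ min (j / 2 + 1) ((total - 1 - i).toNat) := le_min (Nat.le_add_left 1 _) hR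
  have hm2 : min (j / 2 + 1) ((total - 1 - i).toNat) ≤ (total - 1 - i).toNat := min_le_right _ _
  have hcast : total - 1 - (i + ((min (j / 2 + 1) ((total - 1 - i).toNat) : Nat) : Int))
      = (((total - 1 - i).toNat - min (j / 2 + 1) ((total - 1 - i).toNat) : Nat) : Int) := by
    rw [Nat.cast_sub hm2, Int.toNat_of_nonneg (le_of_lt h0)]
    ring
  rw [hcast, Int.toNat_natCast]
  exact Nat.sub_lt hR hm1

-- dict assignment d[(k1,k2)] = v : overwrite in place, new keys append (shared dict primitive)
def pySet (res : List (Int × Int × Int)) (k1 k2 v : Int) : List (Int × Int × Int) :=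
  match res with
  | [] => [(k1, k2, v)]
  | (a, b, c) :: t =>
    if a = k1 ∧ b = k2 then (k1, k2, v) :: t else (a, b, c) :: pySet t k1 k2 v

-- one straight run of m steps in direction (dx,dy): x += dx; y += dy; i += 1; emit
-- (the body of each of A's four ring-edge 'for' loops, and of B's inner 'for' loop)
def walk (size dx dy : Int) : Nat → (List (Int × Int × Int)) × Int × Int × Int →
    (List (Int × Int × Int)) × Int × Int × Int
  | 0, st => st
  | m + 1, (res, i, x, y) =>
    walk size dx dy m (pySet res (x + dx + size) (y + dy + size) (i + 1), i + 1, x + dx, y + dy)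

-- ===== PORT A =====
def enumSpiral (size : Int) (offset n : Int) (res : List (Int × Int × Int)) :
    List (Int × Int × Int) :=
  if n = 0 then
    enumSpiral size (offset + 1) (n + 1) (pySet res (0 + size) (0 + size) offset)
  else if n ≤ size then
    -- x = n; y = n - 1; i = offset; emit(i, x, y)
    let st0 := (pySet res (n + size) (n - 1 + size) offset, offset, n, n - 1)
    let st1 := walk size 0 (-1) (2 * n - 1).toNat st0   -- for j in range(0, 2n-1): y -= 1 …
    let st2 := walk size (-1) 0 (2 * n).toNat st1       -- for j in range(0, 2n): x -= 1 …
    let st3 := walk size 0 1 (2 * n).toNat st2          -- for j in range(0, 2n): y += 1 …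
    let st4 := walk size 1 0 (2 * n).toNat st3          -- for j in range(0, 2n): x += 1 …
    enumSpiral size (st4.2.1 + 1) (n + 1) st4.1
  else res
termination_by ((size + 1 - n).toNat + (1 - n).toNat)
decreasing_by
  · exact enumSpiral_dec0 size n (by assumption)
  · exact enumSpiral_dec1 size n (by assumption) (by assumption)

def calc_spiral_coords (size : Int) : List (Int × Int × Int) :=
  enumSpiral size 0 0 []

-- ===== PORT B =====
def bDirs : List (Int × Int) := [(1, 0), (0, -1), (-1, 0), (0, 1)]

-- cited by bLoop's termination proof
theorem walk_i (size dx dy : Int) (m : Nat) (st : (List (Int × Int × Int)) × Int × Int × Int) :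
    (walk size dx dy m st).2.1 = st.2.1 + m := by
  induction m generalizing st with
  | zero => simp [walk]
  | succ k ih =>
    obtain ⟨res, i, x, y⟩ := st
    simp [walk, ih]
    omega

-- the 'while i < total - 1' loop of Source B (j is the leg counter, always ≥ 0)
def bLoop (size total : Int) (j : Nat) (x y i : Int) (res : List (Int × Int × Int)) :
    List (Int × Int × Int) :=
  if h : i < total - 1 then
    let d := bDirs.getD (j % 4) (0, 0)
    let len : Nat := min (j / 2 + 1) ((total - 1 - i).toNat)
    let st := walk size d.1 d.2 len (res, i, x, y)
    bLoop size total (j + 1) st.2.2.1 st.2.2.2 st.2.1 st.1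
  else res
termination_by (total - 1 - i).toNat
decreasing_by
  rw [walk_i]
  exact bLoop_dec total i j h

def calc_spiral_coords_alt (size : Int) : List (Int × Int × Int) :=
  let n := max size 0
  let total := (2 * n + 1) ^ 2
  bLoop size total 0 0 0 0 [(size, size, 0)]

-- ===== PRECONDITION & SPEC =====
def Spec_calc_spiral_coords (size : Int) (out : List (Int × Int × Int)) : Prop := out = calc_spiral_coords_alt size
instance (size : Int) (out : List (Int × Int × Int)) : Decidable (Spec_calc_spiral_coords size out) := by unfold Spec_calc_spiral_coords; infer_instance

-- ===== CLAIM (what is proved, stated in full; the proofs are below) =====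
def Claim_equal_calc_spiral_coords : Prop := ∀ (size : Int), Dom_calc_spiral_coords size → Spec_calc_spiral_coords size (calc_spiral_coords size)

-- ===== LEMMAS AND PROOFS =====

theorem walk_state (s dx dy : Int) (m : Nat) (st : (List (Int × Int × Int)) × Int × Int × Int) :
    (walk s dx dy m st).2 = (st.2.1 + m, st.2.2.1 + m * dx, st.2.2.2 + m * dy) := by
  induction m generalizing st with
  | zero => obtain ⟨res, i, x, y⟩ := st; simp [walk]
  | succ k ih =>
    obtain ⟨res, i, x, y⟩ := st
    simp [walk, ih]
    refine ⟨by omega, by ring, by ring⟩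

theorem walk_add (s dx dy : Int) (a b : Nat) (st : (List (Int × Int × Int)) × Int × Int × Int) :
    walk s dx dy (a + b) st = walk s dx dy b (walk s dx dy a st) := by
  induction a generalizing st with
  | zero => simp [walk]
  | succ k ih =>
    obtain ⟨res, i, x, y⟩ := st
    rw [show k + 1 + b = (k + b) + 1 by omega]
    simp only [walk]
    exact ih _

theorem walk_tuple (s dx dy : Int) (m : Nat) (res : List (Int × Int × Int))
    (i x y i' x' y' : Int) (hi : i' = i + m) (hx : x' = x + m * dx) (hy : y' = y + m * dy) :
    walk s dx dy m (res, i, x, y) = ((walk s dx dy m (res, i, x, y)).1, i', x', y') := by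
  subst hi hx hy
  calc walk s dx dy m (res, i, x, y)
      = ((walk s dx dy m (res, i, x, y)).1, (walk s dx dy m (res, i, x, y)).2) := by
        rw [Prod.mk.eta]
    _ = _ := by rw [walk_state]

theorem main_align (s : Int) (k : Nat) : ∀ (n : Nat), (n : Int) + k = s →
    ∀ (res : List (Int × Int × Int)),
    bLoop s ((2 * s + 1) ^ 2) (4 * n) (-(n : Int)) (n : Int) (2 * n * (2 * n + 1)) res =
      enumSpiral s ((walk s 1 0 (2 * n) (res, 2 * n * (2 * n + 1), -(n : Int), (n : Int))).2.1 + 1)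
        ((n : Int) + 1)
        (walk s 1 0 (2 * n) (res, 2 * n * (2 * n + 1), -(n : Int), (n : Int))).1 := by
  induction k with
  | zero =>
    intro n hn res
    simp only [Nat.cast_zero, add_zero] at hn
    subst hn
    by_cases h0 : n = 0
    · subst h0
      rw [bLoop, dif_neg (by norm_num)]
      norm_num [walk]
      rw [enumSpiral]
      norm_num
    · -- n = s > 0 : one capped +x leg of length 2n, then both sides stop
      have hpos : (1 : Int) ≤ (n : Int) := by exact_mod_cast Nat.one_le_iff_ne_zero.mpr h0
      rw [bLoop]
      rw [dif_pos (by nlinarith)]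
      have hmod : 4 * n % 4 = 0 := by omega
      have hrem : ((2 * (n : Int) + 1) ^ 2 - 1 - 2 * (n : Int) * (2 * (n : Int) + 1) : Int) = 2 * (n : Int) := by ring
      have hlen : min (4 * n / 2 + 1) (((2 * (n : Int) + 1) ^ 2 - 1 - 2 * (n : Int) * (2 * (n : Int) + 1)).toNat) = 2 * n := by
        rw [hrem]; omega
      simp only [hmod, hlen, bDirs, List.getD, List.getElem?_cons_zero, Option.getD_some]
      have hw := walk_tuple (n : Int) 1 0 (2 * n) res (2 * (n : Int) * (2 * (n : Int) + 1)) (-(n : Int)) (n : Int)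
        ((2 * (n : Int) + 1) ^ 2 - 1) (n : Int) (n : Int)
        (by push_cast; ring) (by push_cast; ring) (by push_cast; ring)
      rw [hw]
      rw [bLoop, dif_neg (lt_irrefl _)]
      rw [enumSpiral]
      rw [if_neg (by omega), if_neg (by omega)]
  | succ k ih =>
    intro n hn res
    have hns : (n : Int) + 1 ≤ s := by push_cast at hn; omega
    have hD : (2*s+1)^2 - 1 - 2*(n:Int)*(2*(n:Int)+1) ≥ 10*(n:Int) + 8 := by
      have h1 : (0:Int) ≤ s - (n:Int) - 1 := by omega
      have h2 : (0:Int) ≤ s + (n:Int) + 2 := by omega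
      nlinarith [mul_nonneg h1 h2]
    -- ===== A side: unfold ring n+1 =====
    have hoff : (walk s 1 0 (2*n) (res, 2*(n:Int)*(2*(n:Int)+1), -(n:Int), (n:Int))).2.1 + 1
        = 2*(n:Int)*(2*(n:Int)+1) + 2*(n:Int) + 1 := by
      rw [walk_i]; push_cast; ring
    rw [hoff, enumSpiral, if_neg (show ¬((n:Int)+1 = 0) by omega), if_pos hns]
    try dsimp only
    rw [show (2*((n:Int)+1)-1).toNat = 2*n+1 from by omega,
        show (2*((n:Int)+1)).toNat = 2*n+2 from by omega]
    -- the ring-start emit of A is one more +x step on top of A's previous right edge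
    have hET : ((pySet ((walk s 1 0 (2*n) (res, 2*(n:Int)*(2*(n:Int)+1), -(n:Int), (n:Int))).1)
          ((n:Int) + 1 + s) ((n:Int) + 1 - 1 + s) (2*(n:Int)*(2*(n:Int)+1) + 2*(n:Int) + 1),
          2*(n:Int)*(2*(n:Int)+1) + 2*(n:Int) + 1, (n:Int) + 1, (n:Int) + 1 - 1)
          : (List (Int × Int × Int)) × Int × Int × Int)
        = walk s 1 0 (2*n+1) (res, 2*(n:Int)*(2*(n:Int)+1), -(n:Int), (n:Int)) := by
      rw [walk_add s 1 0 (2*n) 1,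
          walk_tuple s 1 0 (2*n) res (2*(n:Int)*(2*(n:Int)+1)) (-(n:Int)) (n:Int)
            (2*(n:Int)*(2*(n:Int)+1) + 2*(n:Int)) ((n:Int)) ((n:Int))
            (by push_cast; ring) (by push_cast; ring) (by push_cast; ring)]
      simp only [walk]
      norm_num
    rw [hET]
    -- ===== B side: the four legs 4n .. 4n+3 =====
    -- leg 4n : (+1,0), length 2n+1
    rw [bLoop, dif_pos (show (2*(n:Int)*(2*(n:Int)+1) : Int) < (2*s+1)^2 - 1 by linarith)]
    rw [show 4*n % 4 = 0 from by omega]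
    have hlen1 : min (4*n/2 + 1) (((2*s+1)^2 - 1 - 2*(n:Int)*(2*(n:Int)+1)).toNat) = 2*n+1 := by
      rw [show (4*n/2 + 1 : Nat) = 2*n+1 from by omega]
      refine min_eq_left ?_
      rw [Int.le_toNat (by linarith)]
      push_cast; linarith
    rw [hlen1]
    simp only [bDirs, List.getD, List.getElem?_cons_zero, Option.getD_some]
    try dsimp only
    rw [walk_tuple s 1 0 (2*n+1) res (2*(n:Int)*(2*(n:Int)+1)) (-(n:Int)) (n:Int)
        (2*(n:Int)*(2*(n:Int)+1) + (2*(n:Int)+1)) ((n:Int)+1) ((n:Int))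
        (by push_cast; ring) (by push_cast; ring) (by push_cast; ring)]
    try dsimp only
    set W1 : List (Int × Int × Int) :=
      (walk s 1 0 (2*n+1) (res, 2*(n:Int)*(2*(n:Int)+1), -(n:Int), (n:Int))).1 with hW1
    -- leg 4n+1 : (0,-1), length 2n+1
    rw [bLoop, dif_pos (show (2*(n:Int)*(2*(n:Int)+1) + (2*(n:Int)+1) : Int) < (2*s+1)^2 - 1 by linarith)]
    rw [show (4*n+1) % 4 = 1 from by omega]
    have hlen2 : min ((4*n+1)/2 + 1)
        (((2*s+1)^2 - 1 - (2*(n:Int)*(2*(n:Int)+1) + (2*(n:Int)+1))).toNat) = 2*n+1 := by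
      rw [show ((4*n+1)/2 + 1 : Nat) = 2*n+1 from by omega]
      refine min_eq_left ?_
      rw [Int.le_toNat (by linarith)]
      push_cast; linarith
    rw [hlen2]
    simp only [bDirs, List.getD, List.getElem?_cons_zero, List.getElem?_cons_succ, Option.getD_some]
    try dsimp only
    rw [walk_tuple s 0 (-1) (2*n+1) W1 (2*(n:Int)*(2*(n:Int)+1) + (2*(n:Int)+1)) ((n:Int)+1) ((n:Int))
        (2*(n:Int)*(2*(n:Int)+1) + (4*(n:Int)+2)) ((n:Int)+1) (-((n:Int)+1))
        (by push_cast; ring) (by push_cast; ring) (by push_cast; ring)]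
    try dsimp only
    set W2 : List (Int × Int × Int) :=
      (walk s 0 (-1) (2*n+1) (W1, 2*(n:Int)*(2*(n:Int)+1) + (2*(n:Int)+1), (n:Int)+1, (n:Int))).1 with hW2
    -- leg 4n+2 : (-1,0), length 2n+2
    rw [bLoop, dif_pos (show (2*(n:Int)*(2*(n:Int)+1) + (4*(n:Int)+2) : Int) < (2*s+1)^2 - 1 by linarith)]
    rw [show (4*n+1+1) % 4 = 2 from by omega]
    have hlen3 : min ((4*n+1+1)/2 + 1)
        (((2*s+1)^2 - 1 - (2*(n:Int)*(2*(n:Int)+1) + (4*(n:Int)+2))).toNat) = 2*n+2 := by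
      rw [show ((4*n+1+1)/2 + 1 : Nat) = 2*n+2 from by omega]
      refine min_eq_left ?_
      rw [Int.le_toNat (by linarith)]
      push_cast; linarith
    rw [hlen3]
    simp only [bDirs, List.getD, List.getElem?_cons_zero, List.getElem?_cons_succ, Option.getD_some]
    try dsimp only
    rw [walk_tuple s (-1) 0 (2*n+2) W2 (2*(n:Int)*(2*(n:Int)+1) + (4*(n:Int)+2)) ((n:Int)+1) (-((n:Int)+1))
        (2*(n:Int)*(2*(n:Int)+1) + (6*(n:Int)+4)) (-((n:Int)+1)) (-((n:Int)+1))
        (by push_cast; ring) (by push_cast; ring) (by push_cast; ring)]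
    try dsimp only
    set W3 : List (Int × Int × Int) :=
      (walk s (-1) 0 (2*n+2) (W2, 2*(n:Int)*(2*(n:Int)+1) + (4*(n:Int)+2), (n:Int)+1, -((n:Int)+1))).1 with hW3
    -- leg 4n+3 : (0,1), length 2n+2
    rw [bLoop, dif_pos (show (2*(n:Int)*(2*(n:Int)+1) + (6*(n:Int)+4) : Int) < (2*s+1)^2 - 1 by linarith)]
    rw [show (4*n+1+1+1) % 4 = 3 from by omega]
    have hlen4 : min ((4*n+1+1+1)/2 + 1)
        (((2*s+1)^2 - 1 - (2*(n:Int)*(2*(n:Int)+1) + (6*(n:Int)+4))).toNat) = 2*n+2 := by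
      rw [show ((4*n+1+1+1)/2 + 1 : Nat) = 2*n+2 from by omega]
      refine min_eq_left ?_
      rw [Int.le_toNat (by linarith)]
      push_cast; linarith
    rw [hlen4]
    simp only [bDirs, List.getD, List.getElem?_cons_zero, List.getElem?_cons_succ, Option.getD_some]
    try dsimp only
    rw [walk_tuple s 0 1 (2*n+2) W3 (2*(n:Int)*(2*(n:Int)+1) + (6*(n:Int)+4)) (-((n:Int)+1)) (-((n:Int)+1))
        (2*((n:Int)+1)*(2*((n:Int)+1)+1)) (-((n:Int)+1)) ((n:Int)+1)
        (by push_cast; ring) (by push_cast; ring) (by push_cast; ring)]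
    try dsimp only
    set W4 : List (Int × Int × Int) :=
      (walk s 0 1 (2*n+2) (W3, 2*(n:Int)*(2*(n:Int)+1) + (6*(n:Int)+4), -((n:Int)+1), -((n:Int)+1))).1 with hW4
    -- hand over to the induction hypothesis at ring n+1
    rw [show 4*n+1+1+1+1 = 4*(n+1) from by omega]
    have ihI := ih (n+1) (by push_cast at hn ⊢; omega) W4
    push_cast at ihI
    rw [show (2*(n+1) : Nat) = 2*n+2 from by omega] at ihI
    rw [ihI]


-- ===== VERDICT (by name: the statement is the Claim_ definition above) =====
theorem calc_spiral_coords_spec : Claim_equal_calc_spiral_coords := by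
  unfold Claim_equal_calc_spiral_coords Spec_calc_spiral_coords
  intro s _
  unfold calc_spiral_coords calc_spiral_coords_alt
  by_cases hs : 0 ≤ s
  · have hmax : max s 0 = s := by omega
    rw [hmax]
    rw [enumSpiral]
    have h := main_align s s.toNat 0 (by omega) [(s, s, 0)]
    norm_num [walk] at h
    rw [show pySet [] (0 + s) (0 + s) 0 = [(s, s, 0)] by simp [pySet]]
    rw [h]
    norm_num
  · have hmax : max s 0 = 0 := by omega
    rw [hmax]
    rw [enumSpiral]
    rw [enumSpiral]
    have h1 : ¬ ((0 : Int) + 1 = 0) := by omega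
    have h2 : ¬ ((0 : Int) + 1 ≤ s) := by omega
    rw [if_neg h1, if_neg h2]
    rw [bLoop]
    rw [dif_neg (by norm_num)]
    simp [pySet]
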